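-- pv_equiv track=rewrite | github.com/kika1s1/Codeforces-Contest-Solutions | Codeforces Round 943 (Div. 3)/A_Maximize.py | findMaxim
-- ===== SOURCE A (Python) =====
-- from math import gcd
--
-- def findMaxim(x):
--     maxim = float("-inf")
--     ans = -1
--     for i in range(1, x):
--         if gcd(x, i) + i > maxim:
--             maxim = gcd(x, i) + i
--             ans = i
--     return ans
-- ===== SOURCE B (Python) =====
-- def findMaxim(x):
--     # gcd(x,i)+i <= i + (x-i) = x, with equality iff (x-i) divides x.
--     # So the max is x, first attained at i = x - (largest proper divisor)
--     # = x - x // spf(x), where spf is the smallest factor >= 2.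
--     if x < 2:
--         return -1
--     d = 2
--     while d * d <= x:
--         if x % d == 0:
--             return x - x // d
--         d += 1
--     return x - 1  # x is prime: largest proper divisor is 1
-- ===== Notes on version B (the rewrite author's own statement) =====
-- stated objective: faster
-- what changed: Replaces the linear scan of all i<x maximizing gcd(x,i)+i by the closed form x - x//spf(x) (the max is always x, first reached at x minus the largest proper divisor), computing the smallest prime factor by trial division up to sqrt(x).
import Mathlib
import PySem

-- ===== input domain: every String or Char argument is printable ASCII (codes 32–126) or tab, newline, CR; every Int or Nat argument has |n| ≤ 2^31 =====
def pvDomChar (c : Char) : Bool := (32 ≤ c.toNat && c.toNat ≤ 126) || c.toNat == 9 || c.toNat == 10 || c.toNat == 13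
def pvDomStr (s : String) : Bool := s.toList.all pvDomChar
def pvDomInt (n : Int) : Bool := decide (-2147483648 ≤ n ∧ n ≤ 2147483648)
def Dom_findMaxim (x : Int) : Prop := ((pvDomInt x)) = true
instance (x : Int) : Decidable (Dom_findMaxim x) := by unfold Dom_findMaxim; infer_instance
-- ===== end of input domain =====

-- B replaces A's linear scan by the closed form x - x//spf(x) (trial division up to sqrt x).

-- ===== PORT A =====
-- loop state: (maxim, ans); `none` stands for the initial float("-inf") (any int exceeds it)
def fmStep (x : Int) (st : Option Int × Int) (i : Int) : Option Int × Int :=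
  let v : Int := (Int.gcd x i : Int) + i   -- gcd(x, i) + i (math.gcd is the nonnegative gcd)
  match st with
  | (none, _) => (some v, i)
  | (some m, a) => if m < v then (some v, i) else (some m, a)

def findMaxim (x : Int) : Int :=
  ((PySem.List.pyRange 1 x 1).foldl (fmStep x) (none, -1)).2

-- ===== PORT B =====
-- the `2 ≤ d` conjunct only makes termination evident; every call has d ≥ 2, as in Source B
def spfLoop (x d : Int) : Int :=
  if h : 2 ≤ d ∧ d * d ≤ x then
    if PySem.Int.mod x d = 0 then d else spfLoop x (d + 1)
  else x
termination_by (x - d).toNat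
decreasing_by
  have h2 : 2 * d ≤ d * d := by nlinarith [h.1]
  omega

def findMaxim_alt (x : Int) : Int :=
  if x < 2 then -1
  else
    -- while loop of Source B; returning x - x//d on the found factor, x - 1 ↔ spfLoop = x there
    let p := spfLoop x 2
    x - PySem.Int.floordiv x p

-- ===== PRECONDITION & SPEC =====
def Spec_findMaxim (x : Int) (out : Int) : Prop := out = findMaxim_alt x
instance (x : Int) (out : Int) : Decidable (Spec_findMaxim x out) := by unfold Spec_findMaxim; infer_instance

-- ===== CLAIM (what is proved, stated in full; the proofs are below) =====
def Claim_equal_findMaxim : Prop := ∀ (x : Int), Dom_findMaxim x → Spec_findMaxim x (findMaxim x)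

-- ===== LEMMAS AND PROOFS =====

-- f x j := gcd(x,j) + j is at most x on 1 ≤ j < x …
lemma f_le (x j : Int) (_h1 : 1 ≤ j) (h2 : j < x) : (Int.gcd x j : Int) + j ≤ x := by
  have hd : ((Int.gcd x j : Int)) ∣ (x - j) := dvd_sub (Int.gcd_dvd_left x j) (Int.gcd_dvd_right x j)
  have := Int.le_of_dvd (by omega) hd
  omega

-- … with equality exactly when x - j divides x
lemma f_eq_iff (x j : Int) (h1 : 1 ≤ j) (h2 : j < x) :
    (Int.gcd x j : Int) + j = x ↔ (x - j) ∣ x := by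
  constructor
  · intro h
    have : ((Int.gcd x j : Int)) ∣ x := Int.gcd_dvd_left x j
    rwa [show ((Int.gcd x j : Int)) = x - j by omega] at this
  · intro h
    have hj : (x - j) ∣ j := by
      have := dvd_sub h (dvd_refl (x - j))
      simpa using this
    have hg : (x - j) ∣ ((Int.gcd x j : Int)) := Int.dvd_coe_gcd h hj
    have hpos : 0 < ((Int.gcd x j : Int)) := by
      have : Int.gcd x j ≠ 0 := by
        simp [Int.gcd_eq_zero_iff]
        omega
      positivity
    have := Int.le_of_dvd hpos hg
    have := f_le x j h1 h2
    omega

-- spfLoop returns a divisor ≥ 2 with no smaller divisor ≥ 2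
lemma spfLoop_spec (x : Int) (hx : 2 ≤ x) :
    ∀ d, 2 ≤ d → (∀ e, 2 ≤ e → e < d → ¬ e ∣ x) →
      2 ≤ spfLoop x d ∧ spfLoop x d ∣ x ∧ ∀ e, 2 ≤ e → e < spfLoop x d → ¬ e ∣ x := by
  intro d
  induction d using spfLoop.induct x with
  | case1 d h hmod =>
    intro hd hbelow
    rw [spfLoop, dif_pos h, if_pos hmod]
    refine ⟨hd, ?_, hbelow⟩
    rwa [PySem.Int.mod_eq_zero_iff_dvd] at hmod
  | case2 d h hmod ih =>
    intro hd hbelow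
    rw [spfLoop, dif_pos h, if_neg hmod]
    apply ih (by omega)
    intro e he1 he2 hdvd
    rcases lt_or_eq_of_le (by omega : e ≤ d) with hlt | heq
    · exact hbelow e he1 hlt hdvd
    · subst heq
      rw [PySem.Int.mod_eq_zero_iff_dvd] at hmod
      · exact hmod hdvd
  | case3 d h =>
    intro hd hbelow
    rw [spfLoop, dif_neg h]
    have hdd : x < d * d := by
      rcases not_and_or.mp h with h' | h'
      · omega
      · omega
    refine ⟨hx, dvd_refl x, ?_⟩
    intro e he1 he2 ⟨c, hc⟩
    have hc2 : 2 ≤ c := by nlinarith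
    have hcd : c ∣ x := ⟨e, by linarith [hc]⟩
    -- e * c = x < d * d forces e < d or c < d
    by_cases hed : e < d
    · exact hbelow e he1 hed ⟨c, hc⟩
    · have hcdlt : c < d := by nlinarith
      exact hbelow c hc2 hcdlt hcd

-- x / spf is the largest proper divisor
lemma div_spf_max (x p : Int) (hx : 2 ≤ x) (hp2 : 2 ≤ p) (hpd : p ∣ x)
    (hmin : ∀ e, 2 ≤ e → e < p → ¬ e ∣ x) (m : Int) (hm : m ∣ x) (hmlt : m < x) :
    m ≤ x / p := by
  have hq : p * (x / p) = x := Int.mul_ediv_cancel' hpd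
  set q := x / p with hqdef
  have hq1 : 1 ≤ q := by nlinarith
  rcases (by omega : m ≤ 0 ∨ 1 ≤ m) with hm0 | hm1
  · omega
  · obtain ⟨c, hc⟩ := hm
    have hc2 : 2 ≤ c := by nlinarith
    have hcp : p ≤ c := by
      by_contra hcontra
      exact hmin c hc2 (by omega) ⟨m, by linarith [hc]⟩
    nlinarith

lemma foldl_no_update (x v a : Int) (L : List Int)
    (h : ∀ j ∈ L, (Int.gcd x j : Int) + j ≤ v) :
    L.foldl (fmStep x) (some v, a) = (some v, a) := by
  induction L with
  | nil => rfl
  | cons j L ih =>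
    have hj := h j (by simp)
    simp only [List.foldl_cons, fmStep]
    rw [if_neg (by omega)]
    exact ih (fun j hj => h j (by simp [hj]))

lemma foldl_bounded (x v : Int) (L : List Int)
    (h : ∀ j ∈ L, (Int.gcd x j : Int) + j < v) :
    ∀ st : Option Int × Int, (st.1 = none ∨ ∃ m, st.1 = some m ∧ m < v) →
      ((L.foldl (fmStep x) st).1 = none ∨ ∃ m, (L.foldl (fmStep x) st).1 = some m ∧ m < v) := by
  induction L with
  | nil => intro st hst; simpa using hst
  | cons j L ih =>
    intro st hst
    have hj := h j (by simp)
    simp only [List.foldl_cons]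
    apply ih (fun j hj => h j (by simp [hj]))
    rcases st with ⟨m?, a⟩
    rcases hst with hnone | ⟨m, hm, hmv⟩
    · simp at hnone; subst hnone
      exact Or.inr ⟨_, rfl, hj⟩
    · simp at hm; subst hm
      simp only [fmStep]
      split
      · exact Or.inr ⟨_, rfl, hj⟩
      · exact Or.inr ⟨m, rfl, hmv⟩

lemma main_eq (x : Int) : findMaxim x = findMaxim_alt x := by
  rcases (by omega : x < 2 ∨ 2 ≤ x) with hx | hx
  · -- empty range: A returns -1, B's small branch
    rw [findMaxim, PySem.List.pyRange_one_eq_nil (by omega), findMaxim_alt, if_pos hx]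
    rfl
  · set p := spfLoop x 2 with hp
    obtain ⟨hp2, hpd, hmin⟩ := spfLoop_spec x hx 2 le_rfl (by omega)
    have hq : p * (x / p) = x := Int.mul_ediv_cancel' hpd
    set q := x / p with hqdef
    have hq1 : 1 ≤ q := by nlinarith
    have hqlt : q < x := by nlinarith
    have hqdvd : q ∣ x := ⟨p, by linarith⟩
    set i := x - q with hidef
    have hi1 : 1 ≤ i := by omega
    have hix : i < x := by omega
    have hfi : (Int.gcd x i : Int) + i = x := by
      rw [f_eq_iff x i hi1 hix]
      simpa [hidef] using hqdvd
    have hsmall : ∀ j, 1 ≤ j → j < i → (Int.gcd x j : Int) + j < x := by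
      intro j hj1 hj2
      have hle := f_le x j hj1 (by omega)
      rcases lt_or_eq_of_le hle with h | h
      · exact h
      · exfalso
        have hdvd : (x - j) ∣ x := (f_eq_iff x j hj1 (by omega)).mp h
        have := div_spf_max x p hx hp2 hpd hmin (x - j) hdvd (by omega)
        omega
    -- decompose the range at i and run the fold
    rw [findMaxim,
        PySem.List.pyRange_one_append 1 i x (by omega) (by omega),
        PySem.List.pyRange_one_cons hix,
        List.foldl_append]
    have hb := foldl_bounded x x (PySem.List.pyRange 1 i 1)
      (by
        intro j hj
        rw [PySem.List.mem_pyRange_one] at hj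
        exact hsmall j hj.1 hj.2)
      (none, -1) (Or.inl rfl)
    set st1 := (PySem.List.pyRange 1 i 1).foldl (fmStep x) (none, -1) with hst1
    have hstep : fmStep x st1 i = (some x, i) := by
      rcases st1 with ⟨m?, a⟩
      rcases hb with hnone | ⟨m, hm, hmv⟩
      · simp at hnone; subst hnone
        simp [fmStep, hfi]
      · simp at hm; subst hm
        simp only [fmStep]
        rw [if_pos (by omega)]
        simp [hfi]
    rw [List.foldl_cons, hstep,
        foldl_no_update x x i (PySem.List.pyRange (i + 1) x 1)
          (by
            intro j hj
            rw [PySem.List.mem_pyRange_one] at hj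
            exact f_le x j (by omega) hj.2)]
    rw [findMaxim_alt, if_neg (by omega)]
    have : PySem.Int.floordiv x p = q := by
      rw [PySem.Int.floordiv_eq_ediv_of_pos (by omega)]
    simp only [← hp, this]
    omega

-- ===== VERDICT (by name: the statement is the Claim_ definition above) =====
theorem findMaxim_spec : Claim_equal_findMaxim := by
  intro x _
  unfold Spec_findMaxim
  exact main_eq x
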